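-- pv_equiv track=rewrite | github.com/k2riddim/benjamin-ai-system | agentic_app/agents/project_manager.py | _order_agents_by_importance
-- ===== SOURCE A (Python) =====
-- from typing import Dict, Any, Tuple, List
--
-- def _order_agents_by_importance(agents_list: List[str], intent: str, user_text: str) -> List[str]:
--     """Order agents so the most important one is executed last."""
--
--     # Agent importance hierarchy based on intent and content
--     lower_text = (user_text or "").lower()
--
--     # Define specialist expertise priorities
--     primary_specialist = None
--
--     # Determine primary specialist based on content
--     if any(word in lower_text for word in ["nutrition", "food", "eat", "diet", "meal", "shopping", "recipe", "cook"]):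
--         primary_specialist = "nutritionist"
--     elif any(word in lower_text for word in ["mental", "psychology", "motivation", "stress", "mindset", "behavior"]):
--         primary_specialist = "psychologist"
--     elif any(word in lower_text for word in ["recovery", "sleep", "rest", "tired", "fatigue"]):
--         primary_specialist = "recovery_advisor"
--     elif any(word in lower_text for word in ["strength", "gym", "weights", "lifting", "muscle"]):
--         primary_specialist = "strength_coach"
--     elif any(word in lower_text for word in ["bike", "cycling", "ride", "gravel"]):
--         primary_specialist = "cycling_coach"
--     elif any(word in lower_text for word in ["run", "running", "jog", "pace", "marathon"]):
--         primary_specialist = "running_coach"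
--
--     # Standard importance order (least to most important)
--     importance_order = [
--         "recovery_advisor",    # Provides context
--         "strength_coach",      # Provides support info
--         "cycling_coach",       # Sport-specific input
--         "running_coach",       # Sport-specific input
--         "psychologist",        # Behavioral enhancement
--         "nutritionist"         # Often most detailed/practical
--     ]
--
--     # If we identified a primary specialist, put them last
--     if primary_specialist and primary_specialist in agents_list:
--         ordered = [agent for agent in importance_order if agent in agents_list and agent != primary_specialist]
--         ordered.append(primary_specialist)
--         return ordered
--
--     # Otherwise use standard importance order
--     return [agent for agent in importance_order if agent in agents_list]
-- ===== SOURCE B (Python) =====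
-- from typing import List
--
-- # B: instead of a first-match if/elif cascade, collect ALL specialist groups whose
-- # keywords occur and take the minimum under an explicit priority ranking; instead of
-- # filtering the canonical order (and appending the primary), rank each distinct
-- # applicable agent with an integer key and sort by it.
--
-- _SPECIALIST_KEYWORDS = {
--     "nutritionist": ["nutrition", "food", "eat", "diet", "meal", "shopping", "recipe", "cook"],
--     "psychologist": ["mental", "psychology", "motivation", "stress", "mindset", "behavior"],
--     "recovery_advisor": ["recovery", "sleep", "rest", "tired", "fatigue"],
--     "strength_coach": ["strength", "gym", "weights", "lifting", "muscle"],
--     "cycling_coach": ["bike", "cycling", "ride", "gravel"],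
--     "running_coach": ["run", "running", "jog", "pace", "marathon"],
-- }
--
-- _PRIORITY = {
--     "nutritionist": 0,
--     "psychologist": 1,
--     "recovery_advisor": 2,
--     "strength_coach": 3,
--     "cycling_coach": 4,
--     "running_coach": 5,
-- }
--
-- _IMPORTANCE = ["recovery_advisor", "strength_coach", "cycling_coach",
--                "running_coach", "psychologist", "nutritionist"]
--
-- def _order_agents_by_importance(agents_list: List[str], intent: str, user_text: str) -> List[str]:
--     lower_text = (user_text or "").lower()
--     matched = [s for s, kws in _SPECIALIST_KEYWORDS.items()
--                if any(w in lower_text for w in kws)]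
--     primary = min(matched, key=lambda s: _PRIORITY.get(s, 0)) if matched else None
--     candidates = [a for a in dict.fromkeys(agents_list) if a in _IMPORTANCE]
--     key = lambda a: len(_IMPORTANCE) if a == primary else _IMPORTANCE.index(a)
--     return sorted(candidates, key=key)
-- ===== Notes on version B (the rewrite author's own statement) =====
-- stated objective: alternative
-- what changed: B collects ALL specialist groups whose keywords occur and picks the primary as the minimum under an explicit priority ranking (instead of A's first-match if/elif cascade), and produces the output by integer-ranking the distinct applicable agents and sorting by that key (instead of A's filter-the-canonical-order comprehensions plus move-to-end append).
import Mathlib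
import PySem

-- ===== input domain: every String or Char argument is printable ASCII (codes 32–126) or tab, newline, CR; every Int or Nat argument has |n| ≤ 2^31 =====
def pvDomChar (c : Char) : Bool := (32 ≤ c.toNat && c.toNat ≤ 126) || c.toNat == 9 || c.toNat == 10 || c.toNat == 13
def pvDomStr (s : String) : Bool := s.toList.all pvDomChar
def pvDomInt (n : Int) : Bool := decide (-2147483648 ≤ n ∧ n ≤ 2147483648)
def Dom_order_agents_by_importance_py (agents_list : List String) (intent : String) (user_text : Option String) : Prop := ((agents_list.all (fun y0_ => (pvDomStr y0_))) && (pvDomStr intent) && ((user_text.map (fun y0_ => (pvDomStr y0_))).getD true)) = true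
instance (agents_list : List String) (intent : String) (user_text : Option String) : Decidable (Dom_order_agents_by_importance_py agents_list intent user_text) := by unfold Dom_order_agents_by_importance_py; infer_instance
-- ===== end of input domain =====

-- B replaces A's first-match if/elif cascade by collecting ALL matching specialist groups and
-- taking the minimum under an explicit priority ranking, and replaces A's order-filtering
-- comprehensions (plus move-to-end append) by ranking each distinct applicable agent with an
-- integer key and sorting by it (objective: alternative).

-- ===== PORT A =====
def order_agents_by_importance_py (agents_list : List String) (intent : String) (user_text : Option String) : List String :=
  let lower_text := PySem.Str.lower (user_text.getD "")
  let primary_specialist : Option String :=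
    if (["nutrition", "food", "eat", "diet", "meal", "shopping", "recipe", "cook"].any
        (fun w => PySem.Str.isIn w lower_text)) then some "nutritionist"
    else if (["mental", "psychology", "motivation", "stress", "mindset", "behavior"].any
        (fun w => PySem.Str.isIn w lower_text)) then some "psychologist"
    else if (["recovery", "sleep", "rest", "tired", "fatigue"].any
        (fun w => PySem.Str.isIn w lower_text)) then some "recovery_advisor"
    else if (["strength", "gym", "weights", "lifting", "muscle"].any
        (fun w => PySem.Str.isIn w lower_text)) then some "strength_coach"
    else if (["bike", "cycling", "ride", "gravel"].any
        (fun w => PySem.Str.isIn w lower_text)) then some "cycling_coach"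
    else if (["run", "running", "jog", "pace", "marathon"].any
        (fun w => PySem.Str.isIn w lower_text)) then some "running_coach"
    else none
  let importance_order := ["recovery_advisor", "strength_coach", "cycling_coach",
                           "running_coach", "psychologist", "nutritionist"]
  -- `if primary_specialist and primary_specialist in agents_list` (all six names are truthy strings)
  match primary_specialist with
  | some p =>
    if agents_list.contains p then
      (importance_order.filter (fun a => agents_list.contains a && a != p)) ++ [p]
    else importance_order.filter (fun a => agents_list.contains a)
  | none => importance_order.filter (fun a => agents_list.contains a)

-- ===== PORT B =====
def pvSpecialistKeywords : List (String × List String) :=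
  [("nutritionist", ["nutrition", "food", "eat", "diet", "meal", "shopping", "recipe", "cook"]),
   ("psychologist", ["mental", "psychology", "motivation", "stress", "mindset", "behavior"]),
   ("recovery_advisor", ["recovery", "sleep", "rest", "tired", "fatigue"]),
   ("strength_coach", ["strength", "gym", "weights", "lifting", "muscle"]),
   ("cycling_coach", ["bike", "cycling", "ride", "gravel"]),
   ("running_coach", ["run", "running", "jog", "pace", "marathon"])]

def pvPriority : PySem.Dict String Int :=
  PySem.Dict.ofList [("nutritionist", 0), ("psychologist", 1), ("recovery_advisor", 2),
                     ("strength_coach", 3), ("cycling_coach", 4), ("running_coach", 5)]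

def pvImportance : List String :=
  ["recovery_advisor", "strength_coach", "cycling_coach",
   "running_coach", "psychologist", "nutritionist"]

-- Source B's `key` lambda: len(_IMPORTANCE) if a == primary else _IMPORTANCE.index(a)
-- (.index ported total via index? + getD: every candidate is a member of _IMPORTANCE)
def pvKey (primary : Option String) (a : String) : Int :=
  if some a = primary then (pvImportance.length : Int)
  else (((PySem.List.index? pvImportance a).getD 0 : Nat) : Int)

def order_agents_by_importance_py_alt (agents_list : List String) (intent : String) (user_text : Option String) : List String :=
  let lower_text := PySem.Str.lower (user_text.getD "")
  let matched := (pvSpecialistKeywords.filter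
      (fun kv => kv.2.any (fun w => PySem.Str.isIn w lower_text))).map Prod.fst
  let primary : Option String :=
    if matched.isEmpty then none
    else PySem.List.min? matched (fun s => PySem.Dict.getD pvPriority s 0)
  let candidates := (PySem.List.dedup agents_list).filter (fun a => pvImportance.contains a)
  PySem.List.sorted candidates (pvKey primary) false

-- ===== PRECONDITION & SPEC =====
def Spec_order_agents_by_importance_py (agents_list : List String) (intent : String) (user_text : Option String) (out : List String) : Prop := out = order_agents_by_importance_py_alt agents_list intent user_text
instance (agents_list : List String) (intent : String) (user_text : Option String) (out : List String) : Decidable (Spec_order_agents_by_importance_py agents_list intent user_text out) := by unfold Spec_order_agents_by_importance_py; infer_instance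

-- ===== CLAIM (what is proved, stated in full; the proofs are below) =====
def Claim_equal_order_agents_by_importance_py : Prop := ∀ (agents_list : List String) (intent : String) (user_text : Option String), Dom_order_agents_by_importance_py agents_list intent user_text → Spec_order_agents_by_importance_py agents_list intent user_text (order_agents_by_importance_py agents_list intent user_text)

-- ===== LEMMAS AND PROOFS =====

-- Source B's key of a non-primary agent is its importance index
theorem pvKey_of_ne {q a : String} (h : a ≠ q) : pvKey (some q) a = pvKey none a := by
  simp [pvKey, h]

theorem pvImp_pairwise : pvImportance.Pairwise (fun a b => pvKey none a < pvKey none b) := by decide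

theorem pvKey_lt_len : ∀ a ∈ pvImportance, pvKey none a < (pvImportance.length : Int) := by decide

theorem pvOrd (agents : List String) (p : Option String)
    (hp : p = none ∨ p ∈ pvImportance.map some) :
    PySem.List.sorted ((PySem.List.dedup agents).filter (fun a => pvImportance.contains a)) (pvKey p) false
    = match p with
      | some q =>
        if agents.contains q then (pvImportance.filter (fun a => agents.contains a && a != q)) ++ [q]
        else pvImportance.filter (fun a => agents.contains a)
      | none => pvImportance.filter (fun a => agents.contains a) := by
  have hndc : ((PySem.List.dedup agents).filter (fun a => pvImportance.contains a)).Nodup :=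
    (PySem.List.nodup_dedup agents).filter _
  have hmemc : ∀ a, a ∈ (PySem.List.dedup agents).filter (fun a => pvImportance.contains a) ↔ a ∈ agents ∧ a ∈ pvImportance := by
    intro a; simp [List.mem_filter]
  have hndi : pvImportance.Nodup := by decide
  rcases hp with rfl | hq
  · apply PySem.List.sorted_eq_of_perm_of_pairwise_lt
    · rw [List.perm_ext_iff_of_nodup (hndi.filter _) hndc]
      intro a; rw [hmemc a]; simp [List.mem_filter]; tauto
    · exact pvImp_pairwise.filter _
  · simp only [List.mem_map] at hq
    obtain ⟨q, hqi, rfl⟩ := hq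
    by_cases hca : agents.contains q
    · simp only [hca, if_true]
      apply PySem.List.sorted_eq_of_perm_of_pairwise_lt
      · have hqn : q ∉ pvImportance.filter (fun a => agents.contains a && a != q) := by
          simp [List.mem_filter]
        rw [List.perm_ext_iff_of_nodup (((hndi.filter _).append (List.nodup_singleton q)) (by
            intro a ha hb; simp at hb; subst hb; exact hqn ha)) hndc]
        intro a
        rw [hmemc a]
        simp only [List.mem_append, List.mem_filter, List.mem_singleton, Bool.and_eq_true,
          bne_iff_ne, ne_eq]
        constructor
        · rintro (⟨hi, hc, _⟩ | rfl)
          · exact ⟨by simpa using hc, hi⟩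
          · exact ⟨by simpa using hca, hqi⟩
        · rintro ⟨hc, hi⟩
          by_cases haq : a = q
          · right; exact haq
          · left; exact ⟨hi, by simpa using hc, haq⟩
      · rw [List.pairwise_append]
        refine ⟨(pvImp_pairwise.filter _).imp_of_mem ?_, List.pairwise_singleton _ _, ?_⟩
        · intro a b ha hb hab
          have ha' : a ≠ q := by simp [List.mem_filter] at ha; simpa using ha.2.2
          have hb' : b ≠ q := by simp [List.mem_filter] at hb; simpa using hb.2.2
          rw [pvKey_of_ne ha', pvKey_of_ne hb']; exact hab
        · intro a ha b hb
          simp only [List.mem_singleton] at hb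
          rw [hb]
          simp only [List.mem_filter, Bool.and_eq_true, bne_iff_ne, ne_eq] at ha
          have : pvKey (some q) q = (pvImportance.length : Int) := by simp [pvKey]
          rw [this, pvKey_of_ne ha.2.2]
          exact pvKey_lt_len a ha.1
    · simp only [hca, Bool.false_eq_true, if_false]
      apply PySem.List.sorted_eq_of_perm_of_pairwise_lt
      · rw [List.perm_ext_iff_of_nodup (hndi.filter _) hndc]
        intro a; rw [hmemc a]; simp [List.mem_filter]; tauto
      · refine (pvImp_pairwise.filter _).imp_of_mem ?_
        intro a b ha hb hab
        have hmc : ∀ x, x ∈ pvImportance.filter (fun a => agents.contains a) → x ≠ q := by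
          intro x hx hxq; subst hxq
          simp only [List.mem_filter] at hx
          exact hca hx.2
        rw [pvKey_of_ne (hmc a ha), pvKey_of_ne (hmc b hb)]; exact hab

-- ===== VERDICT (by name: the statement is the Claim_ definition above) =====
theorem order_agents_by_importance_py_spec : Claim_equal_order_agents_by_importance_py := by
  intro agents intent ut _
  unfold Spec_order_agents_by_importance_py order_agents_by_importance_py
    order_agents_by_importance_py_alt
  set L := PySem.Str.lower (ut.getD "") with hL
  by_cases h1 : (["nutrition", "food", "eat", "diet", "meal", "shopping", "recipe", "cook"].any
        (fun w => PySem.Str.isIn w L)) = true <;>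
  by_cases h2 : (["mental", "psychology", "motivation", "stress", "mindset", "behavior"].any
        (fun w => PySem.Str.isIn w L)) = true <;>
  by_cases h3 : (["recovery", "sleep", "rest", "tired", "fatigue"].any
        (fun w => PySem.Str.isIn w L)) = true <;>
  by_cases h4 : (["strength", "gym", "weights", "lifting", "muscle"].any
        (fun w => PySem.Str.isIn w L)) = true <;>
  by_cases h5 : (["bike", "cycling", "ride", "gravel"].any
        (fun w => PySem.Str.isIn w L)) = true <;>
  by_cases h6 : (["run", "running", "jog", "pace", "marathon"].any
        (fun w => PySem.Str.isIn w L)) = true <;>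
  simp only [pvSpecialistKeywords, List.filter, List.map, h1, h2, h3, h4, h5, h6,
    if_true, if_false, Bool.false_eq_true] <;>
  rw [pvOrd agents _ (by decide)] <;> rfl
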